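-- pv_equiv track=rewrite | github.com/RussellDash332/aoc-2015 | Day-07/Python/main.py | replace_var
-- ===== SOURCE A (Python) =====
-- def replace_var(s):
--     s = s.replace('\n', ' ')
--     res = 'var_' + s[0] if s[0].isalpha() else s[0]
--     for i in range(1, len(s)):
--         if s[i].isalpha() and not s[i - 1].isalpha():
--             res += 'var_' + s[i]
--         else:
--             res += s[i]
--     return res
-- ===== SOURCE B (Python) =====
-- def replace_var(s):
--     s = s.replace('\n', ' ')
--     out = []
--     i, n = 0, len(s)
--     while i < n:
--         alpha = s[i].isalpha()
--         j = i
--         while j < n and s[j].isalpha() == alpha: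
--             j += 1
--         out.append(('var_' if alpha else '') + s[i:j])
--         i = j
--     return ''.join(out)
-- ===== Notes on version B (the rewrite author's own statement) =====
-- stated objective: faster
-- what changed: Replaces A's per-character loop (which re-tests the previous character and grows the result by repeated string concatenation) with a run-based scanner that splits the string into maximal alphabetic/non-alphabetic runs, prefixes alphabetic runs, and joins the pieces once.
-- crash fix: On the empty string A raises IndexError (it indexes s[0]); B returns ''. — e.g. on replace_var(""): A raises IndexError, B returns ""
import Mathlib
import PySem

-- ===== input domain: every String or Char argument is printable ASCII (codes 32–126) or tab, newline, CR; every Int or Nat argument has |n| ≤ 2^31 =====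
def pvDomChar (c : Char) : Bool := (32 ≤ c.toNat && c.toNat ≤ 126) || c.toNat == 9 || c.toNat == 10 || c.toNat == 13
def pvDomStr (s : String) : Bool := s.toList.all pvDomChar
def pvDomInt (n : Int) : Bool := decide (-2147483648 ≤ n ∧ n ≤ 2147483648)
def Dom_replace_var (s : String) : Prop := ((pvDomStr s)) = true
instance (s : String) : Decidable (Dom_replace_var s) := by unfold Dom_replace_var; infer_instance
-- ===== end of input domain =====

-- B changes A's stateful per-character loop into a scan over maximal alphabetic /
-- non-alphabetic runs (alternative decomposition, same result); A raises IndexError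
-- on "" (excluded by Pre_), where B returns "".

-- ===== PORT A =====
-- s.replace('\n', ' '): single char for single char, exactly a character-wise map
def pvRepl (cs : List Char) : List Char := cs.map (fun c => if c = '\n' then ' ' else c)

def pvVar : List Char := ['v', 'a', 'r', '_']

-- the loop `for i in range(1, len(s))`: cs are the chars from index 1 on, prev is s[i-1]
def rvA (prev : Char) : List Char → List Char
  | [] => []
  | c :: rest =>
      (if PySem.Chars.isalpha c && !PySem.Chars.isalpha prev then pvVar ++ [c] else [c])
        ++ rvA c rest

def replace_var (s : String) : String :=
  match pvRepl s.toList with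
  | [] => ""   -- Python raises IndexError here (s[0]); excluded by Pre_replace_var
  | c :: rest =>
      String.mk ((if PySem.Chars.isalpha c then pvVar ++ [c] else [c]) ++ rvA c rest)

-- ===== PORT B =====
-- the outer while loop: take the maximal run with the same isalpha key, recurse on the rest
def rvB : List Char → List Char
  | [] => []
  | c :: rest =>
      let a := PySem.Chars.isalpha c
      (if a then pvVar else [])
        ++ (c :: rest).takeWhile (fun x => PySem.Chars.isalpha x == a)
        ++ rvB ((c :: rest).dropWhile (fun x => PySem.Chars.isalpha x == a))
termination_by l => l.length
decreasing_by
  simp only [List.dropWhile_cons, PySem.Chars.isalpha, beq_self_eq_true, if_true]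
  exact Nat.lt_succ_of_le (List.length_dropWhile_le _ _)

def replace_var_alt (s : String) : String := String.mk (rvB (pvRepl s.toList))

-- ===== PRECONDITION & SPEC =====
-- Pre_ excludes only the empty string, on which A raises IndexError via s[0].
def Pre_replace_var (s : String) : Prop := s ≠ ""
instance (s : String) : Decidable (Pre_replace_var s) := by unfold Pre_replace_var; infer_instance
def pvWitness_replace_var : String := "x and y\n-> d1"

-- On the empty string A raises IndexError (it indexes s[0]); B returns "".
def Raises_replace_var (s : String) : Prop := s = ""
instance (s : String) : Decidable (Raises_replace_var s) := by unfold Raises_replace_var; infer_instance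
def pvRaiseWitness_replace_var : String := ""
def pvRaiseWitnessOut_replace_var : String := ""

def Spec_replace_var (s : String) (out : String) : Prop := out = replace_var_alt s
instance (s : String) (out : String) : Decidable (Spec_replace_var s out) := by unfold Spec_replace_var; infer_instance

-- ===== CLAIM (what is proved, stated in full; the proofs are below) =====
def Claim_equal_replace_var : Prop := ∀ (s : String), Dom_replace_var s → Pre_replace_var s → Spec_replace_var s (replace_var s)
def Claim_raises_replace_var : Prop := (∀ (s : String), Dom_replace_var s → Raises_replace_var s → ¬ Pre_replace_var s) ∧ (Dom_replace_var (pvRaiseWitness_replace_var) ∧ Raises_replace_var (pvRaiseWitness_replace_var) ∧ replace_var_alt (pvRaiseWitness_replace_var) = pvRaiseWitnessOut_replace_var)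

-- ===== LEMMAS AND PROOFS =====

theorem rvB_cons_nonalpha (c : Char) (rest : List Char)
    (h : PySem.Chars.isalpha c = false) : rvB (c :: rest) = c :: rvB rest := by
  rw [rvB]
  simp only [h, Bool.false_eq_true, if_false, List.nil_append, List.takeWhile_cons,
    List.dropWhile_cons, beq_self_eq_true, if_true, List.cons_append, List.cons.injEq,
    true_and]
  cases rest with
  | nil => simp [rvB]
  | cons d t =>
    cases hd : PySem.Chars.isalpha d with
    | true => simp [hd]
    | false =>
      conv_rhs => rw [rvB]
      simp [hd]

theorem rvA_master (cs : List Char) (p : Char) :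
    rvA p cs =
      if PySem.Chars.isalpha p then
        cs.takeWhile (fun x => PySem.Chars.isalpha x)
          ++ rvB (cs.dropWhile (fun x => PySem.Chars.isalpha x))
      else rvB cs := by
  induction cs generalizing p with
  | nil => simp [rvA, rvB]
  | cons c rest ih =>
    cases hc : PySem.Chars.isalpha c with
    | true =>
      cases hp : PySem.Chars.isalpha p with
      | true =>
        rw [rvA, ih c]
        simp [hc, hp]
      | false =>
        rw [rvA, ih c]
        conv_rhs => rw [if_neg (by simp [hp]), rvB]
        simp [hc, hp, beq_true]
    | false =>
      cases hp : PySem.Chars.isalpha p with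
      | true =>
        rw [rvA, ih c]
        simp [hc, rvB_cons_nonalpha c rest hc]
      | false =>
        rw [rvA, ih c]
        simp [hc, hp, rvB_cons_nonalpha c rest hc]

-- ===== VERDICT (by name: the statement is the Claim_ definition above) =====
theorem replace_var_spec : Claim_equal_replace_var := by
  intro s _ hpre
  unfold Spec_replace_var replace_var replace_var_alt
  cases h : pvRepl s.toList with
  | nil =>
    exact absurd (String.toList_eq_nil_iff.mp (by simpa [pvRepl] using h)) hpre
  | cons c rest =>
    show String.mk ((if PySem.Chars.isalpha c then pvVar ++ [c] else [c]) ++ rvA c rest)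
      = String.mk (rvB (c :: rest))
    congr 1
    cases hc : PySem.Chars.isalpha c with
    | true =>
      conv_rhs => rw [rvB]
      simp [rvA_master, hc, beq_true]
    | false =>
      rw [rvB_cons_nonalpha c rest hc]
      simp [rvA_master, hc]

@[simp]
theorem replace_var_raises : Claim_raises_replace_var := by
  unfold Claim_raises_replace_var
  refine ⟨fun s _ hr hp => hp hr, by decide, by decide, ?_⟩
  simp [replace_var_alt, pvRepl, rvB, pvRaiseWitness_replace_var, pvRaiseWitnessOut_replace_var]
  rfl
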